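-- pv_equiv track=rewrite | github.com/gisul-git/bash-terminal-engine | execution_engine.py | _expand_tr_set
-- ===== SOURCE A (Python) =====
-- def _expand_tr_set(value: str) -> str:
--     expanded: list[str] = []
--     index = 0
--
--     while index < len(value):
--         if index + 2 < len(value) and value[index + 1] == "-":
--             start = ord(value[index])
--             end = ord(value[index + 2])
--             step = 1 if start <= end else -1
--             expanded.extend(chr(code) for code in range(start, end + step, step))
--             index += 3
--         else:
--             expanded.append(value[index])
--             index += 1
--
--     return "".join(expanded)
-- ===== SOURCE B (Python) =====
-- import re
--
-- def _expand_tr_set(value: str) -> str: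
--     def repl(m):
--         s, e = ord(m.group(1)), ord(m.group(2))
--         lo, hi = min(s, e), max(s, e)
--         block = ''.join(map(chr, range(lo, hi + 1)))
--         return block if s <= e else block[::-1]
--     return re.sub(r'(.)-(.)', repl, value, flags=re.DOTALL)
-- ===== Notes on version B (the rewrite author's own statement) =====
-- stated objective: idiomatic
-- what changed: Replaces the manual index-cursor while-loop over the string with a single re.sub on the pattern (.)-(.) (DOTALL) whose callback expands each range as an ascending block reversed when needed; regex's non-overlapping left-to-right scan replaces the hand-managed cursor arithmetic.
import Mathlib
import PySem

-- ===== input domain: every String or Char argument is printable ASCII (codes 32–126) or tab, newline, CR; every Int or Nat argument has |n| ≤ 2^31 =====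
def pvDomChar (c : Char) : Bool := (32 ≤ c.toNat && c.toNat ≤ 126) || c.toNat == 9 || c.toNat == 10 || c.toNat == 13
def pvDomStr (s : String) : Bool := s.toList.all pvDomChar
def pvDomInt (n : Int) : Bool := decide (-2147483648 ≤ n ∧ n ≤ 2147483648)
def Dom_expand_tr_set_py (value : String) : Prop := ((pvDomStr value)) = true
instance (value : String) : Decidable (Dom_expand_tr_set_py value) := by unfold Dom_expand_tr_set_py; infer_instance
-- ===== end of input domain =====

-- B replaces A's index-cursor while-loop with a regex-style scan (re.sub on '(.)-(.)'), expanding each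
-- matched range as an ascending block reversed for descending ranges; same value, idiomatic rewrite.

-- ===== PORT A =====
-- A's while-loop: cursor `index`, accumulator `expanded`, jump by 3 on a range triple else by 1.
def expandTrLoop (cs : List Char) (expanded : List Char) (index : Nat) : List Char :=
  if index < cs.length then
    if index + 2 < cs.length ∧ cs.getD (index + 1) ' ' = '-' then
      let start : Int := (cs.getD index ' ').toNat
      let e : Int := (cs.getD (index + 2) ' ').toNat
      let step : Int := if start ≤ e then 1 else -1
      expandTrLoop cs
        (expanded ++ (PySem.List.pyRange start (e + step) step).map (fun code => Char.ofNat code.toNat))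
        (index + 3)
    else
      expandTrLoop cs (expanded ++ [cs.getD index ' ']) (index + 1)
  else expanded
termination_by cs.length - index

def expand_tr_set_py (value : String) : String :=
  String.mk (expandTrLoop value.toList [] 0)

-- ===== PORT B =====
-- re.sub callback: ascending block min..max, reversed when the range is descending.
def trRangeBlock (a b : Char) : List Char :=
  let s : Int := a.toNat
  let e : Int := b.toNat
  let block := (PySem.List.pyRange (min s e) (max s e + 1) 1).map (fun code => Char.ofNat code.toNat)
  if s ≤ e then block else block.reverse

-- re.sub's non-overlapping left-to-right scan of the pattern '(.)-(.)': a match consumes three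
-- characters; otherwise one character is copied verbatim and the scan advances by one.
def trScan : List Char → List Char
  | a :: d :: b :: rest =>
      if d = '-' then trRangeBlock a b ++ trScan rest
      else a :: trScan (d :: b :: rest)
  | c :: rest => c :: trScan rest
  | [] => []

def expand_tr_set_py_alt (value : String) : String :=
  String.mk (trScan value.toList)

-- ===== PRECONDITION & SPEC =====
def Spec_expand_tr_set_py (value : String) (out : String) : Prop := out = expand_tr_set_py_alt value
instance (value : String) (out : String) : Decidable (Spec_expand_tr_set_py value out) := by unfold Spec_expand_tr_set_py; infer_instance

-- ===== CLAIM (what is proved, stated in full; the proofs are below) =====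
def Claim_equal_expand_tr_set_py : Prop := ∀ (value : String), Dom_expand_tr_set_py value → Spec_expand_tr_set_py value (expand_tr_set_py value)

-- ===== LEMMAS AND PROOFS =====

-- A's range(start, end+step, step) block equals B's min-to-max block, reversed when descending.
theorem trRangeBlock_eq (a b : Char) :
    (PySem.List.pyRange (a.toNat : Int) ((b.toNat : Int) + (if (a.toNat : Int) ≤ (b.toNat : Int) then 1 else -1))
        (if (a.toNat : Int) ≤ (b.toNat : Int) then 1 else -1)).map (fun code => Char.ofNat code.toNat)
      = trRangeBlock a b := by
  unfold trRangeBlock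
  by_cases h : (a.toNat : Int) ≤ (b.toNat : Int)
  · simp [h]
  · have hle : (b.toNat : Int) ≤ (a.toNat : Int) := le_of_not_ge h
    simp only [h, if_false, min_eq_right hle, max_eq_left hle]
    rw [show (b.toNat : Int) + -1 = (b.toNat : Int) - 1 by ring,
        PySem.List.pyRange_neg_one_eq_reverse]
    rw [show (b.toNat : Int) - 1 + 1 = (b.toNat : Int) by ring]
    simp [List.map_reverse]

-- a short tail (fewer than two characters after the head) is always copied verbatim by the scan
theorem trScan_short (c : Char) (t : List Char) (ht : t.length ≤ 1) :
    trScan (c :: t) = c :: trScan t := by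
  rcases t with _ | ⟨d, _ | ⟨e, r⟩⟩
  · simp [trScan]
  · simp [trScan]
  · simp at ht

-- loop invariant: A's cursor loop appends exactly B's scan of the remaining suffix
theorem expandTrLoop_eq (n : Nat) (cs : List Char) (expanded : List Char) (index : Nat)
    (hn : cs.length - index ≤ n) :
    expandTrLoop cs expanded index = expanded ++ trScan (cs.drop index) := by
  induction n generalizing expanded index with
  | zero =>
      have hge : ¬ index < cs.length := by omega
      rw [expandTrLoop]
      rw [if_neg hge]
      rw [List.drop_eq_nil_of_le (by omega), trScan, List.append_nil]
  | succ n ih =>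
      by_cases hlt : index < cs.length
      · rw [expandTrLoop]
        rw [if_pos hlt]
        by_cases hmatch : index + 2 < cs.length ∧ cs.getD (index + 1) ' ' = '-'
        · rw [if_pos hmatch]
          dsimp only []
          rw [ih _ _ (by omega)]
          rcases hmatch with ⟨h2, hd⟩
          have h1 : index + 1 < cs.length := by omega
          have hdrop : cs.drop index = cs[index] :: cs[index + 1] :: cs[index + 2] :: cs.drop (index + 3) := by
            rw [List.drop_eq_getElem_cons hlt, List.drop_eq_getElem_cons h1,
                List.drop_eq_getElem_cons h2]
          have hd' : cs[index + 1] = '-' := by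
            rwa [List.getD_eq_getElem cs ' ' h1] at hd
          rw [hdrop, trScan, if_pos hd']
          rw [List.getD_eq_getElem cs ' ' hlt, List.getD_eq_getElem cs ' ' h2,
              trRangeBlock_eq, List.append_assoc]
        · rw [if_neg hmatch]
          rw [ih _ _ (by omega), List.append_assoc]
          congr 1
          rw [List.getD_eq_getElem cs ' ' hlt]
          by_cases h2 : index + 2 < cs.length
          · have h1 : index + 1 < cs.length := by omega
            have hd : cs[index + 1] ≠ '-' := by
              intro hcontra
              exact hmatch ⟨h2, by rw [List.getD_eq_getElem cs ' ' h1]; exact hcontra⟩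
            rw [List.drop_eq_getElem_cons hlt, List.drop_eq_getElem_cons h1,
                List.drop_eq_getElem_cons h2, trScan, if_neg hd,
                ← List.drop_eq_getElem_cons h2, ← List.drop_eq_getElem_cons h1]
            rfl
          · rw [List.drop_eq_getElem_cons hlt, trScan_short]
            · rfl
            · have := List.length_drop (l := cs) (i := index + 1)
              omega
      · rw [expandTrLoop]
        rw [if_neg hlt]
        rw [List.drop_eq_nil_of_le (by omega), trScan, List.append_nil]

-- ===== VERDICT (by name: the statement is the Claim_ definition above) =====
theorem expand_tr_set_py_spec : Claim_equal_expand_tr_set_py := by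
  intro value _
  unfold Spec_expand_tr_set_py expand_tr_set_py expand_tr_set_py_alt
  rw [expandTrLoop_eq (value.toList.length)  _ _ _ (by omega)]
  simp
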